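-- pv_equiv track=rewrite | github.com/Bobo-BKL/BookCoding-This_is_coding_test | 추가_삼성 역량테스트 기출문제/드래곤커브.py | draw_dragon
-- ===== SOURCE A (Python) =====
-- dx = [0, -1, 0, 1]
--
-- dy = [1, 0, -1, 0]
--
-- def draw_dragon(graph, drag):
--     start_x, start_y, di, g = drag
--
--     dirs = [di]
--     graph[start_x][start_y] = True
--     for _ in range(g):
--         temp = []
--         for i in range(len(dirs)):
--             temp.append((dirs[-i - 1] + 1) % 4)
--         dirs.extend(temp)
--
--     for d in dirs:
--         start_x += dx[d]
--         start_y += dy[d]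
--         if 0 <= start_x <= 100 and 0 <= start_y <= 100:
--             graph[start_x][start_y] = True
--
--     return graph
-- ===== SOURCE B (Python) =====
-- # B: per-segment generation of the dragon curve via the turn rule (left iff the
-- # odd part of the segment index is 1 mod 4), instead of building and reversing
-- # the whole direction list generation by generation.
-- # Like A, mutates `graph` in place (the same cells are written).
--
-- dx = [0, -1, 0, 1]
-- dy = [1, 0, -1, 0]
--
-- def draw_dragon(graph, drag):
--     x, y, cur, g = drag
--     graph[x][y] = True
--     # segment 0 is the plain initial direction, no turn
--     x += dx[cur]
--     y += dy[cur]
--     if 0 <= x <= 100 and 0 <= y <= 100: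
--         graph[x][y] = True
--     for n in range(1, 2 ** max(g, 0)):  # a negative generation count draws just the first segment
--         m = n
--         while m % 2 == 0:
--             m //= 2
--         cur = (cur + (1 if m % 4 == 1 else -1)) % 4
--         x += dx[cur]
--         y += dy[cur]
--         if 0 <= x <= 100 and 0 <= y <= 100:
--             graph[x][y] = True
--     return graph
-- ===== Notes on version B (the rewrite author's own statement) =====
-- stated objective: alternative
-- what changed: B never builds or reverses the exponentially growing direction list: it walks the curve segment by segment, deriving each turn directly from the segment index (left iff the odd part of the index is 1 mod 4) and keeping only the current direction, instead of A's generation-by-generation list doubling (append the reversed list rotated by one) followed by a second pass over the list.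
import Mathlib
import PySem

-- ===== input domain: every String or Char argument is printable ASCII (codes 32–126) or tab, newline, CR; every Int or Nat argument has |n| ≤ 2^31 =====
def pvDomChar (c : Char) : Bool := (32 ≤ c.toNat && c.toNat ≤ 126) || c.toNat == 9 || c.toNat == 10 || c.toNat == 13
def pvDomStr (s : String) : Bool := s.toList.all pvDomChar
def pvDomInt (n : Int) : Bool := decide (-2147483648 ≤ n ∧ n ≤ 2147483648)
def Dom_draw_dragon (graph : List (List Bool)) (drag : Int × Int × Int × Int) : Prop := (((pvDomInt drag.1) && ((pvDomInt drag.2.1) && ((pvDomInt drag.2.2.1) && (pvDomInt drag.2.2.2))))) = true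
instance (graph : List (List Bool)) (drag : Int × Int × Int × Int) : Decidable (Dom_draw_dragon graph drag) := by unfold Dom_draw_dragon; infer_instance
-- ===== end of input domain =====

-- B replaces A's exponential build-and-reverse of the direction list by a per-segment
-- turn computed from the segment index; equivalence is about the RETURN value only
-- (both Pythons also mutate `graph` in place, writing the same cells).

-- ===== PORT A =====
-- shared move tables and the move-and-mark step (identical lines in both Pythons)
def pvDx : List Int := [0, -1, 0, 1]
def pvDy : List Int := [1, 0, -1, 0]

-- graph[x][y] = True as a pure update (total: out-of-range writes are no-ops, which
-- Pre_ keeps unreachable — Python raises IndexError there)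
def pvMark (g : List (List Bool)) (x y : Int) : List (List Bool) :=
  PySem.List.pySetD g x (PySem.List.pySetD (PySem.List.pyGetD g x []) y true)

-- one segment: move in direction d, mark if inside the 0..100 board
def pvStep (st : Int × Int × List (List Bool)) (d : Int) : Int × Int × List (List Bool) :=
  let x := st.1 + PySem.List.pyGetD pvDx d 0
  let y := st.2.1 + PySem.List.pyGetD pvDy d 0
  (x, y, if 0 ≤ x ∧ x ≤ 100 ∧ 0 ≤ y ∧ y ≤ 100 then pvMark st.2.2 x y else st.2.2)

def draw_dragon (graph : List (List Bool)) (drag : Int × Int × Int × Int) : List (List Bool) :=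
  let sx := drag.1; let sy := drag.2.1; let di := drag.2.2.1; let g := drag.2.2.2
  let graph1 := pvMark graph sx sy
  let dirs := (PySem.List.pyRange 0 g 1).foldl
    (fun dirs _ =>
      dirs ++ (PySem.List.pyRange 0 (dirs.length : Int) 1).foldl
        (fun temp i => temp ++ [PySem.Int.mod (PySem.List.pyGetD dirs (-i - 1) 0 + 1) 4]) [])
    [di]
  (dirs.foldl pvStep (sx, sy, graph1)).2.2

-- ===== PORT B =====
-- `while m % 2 == 0: m //= 2` with structural fuel (fuel n suffices: m starts at n and halves)
def pvOddPartF : Nat → Nat → Nat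
  | 0, m => m
  | f + 1, m => if m % 2 = 0 ∧ m ≠ 0 then pvOddPartF f (m / 2) else m
def pvOddPart (n : Nat) : Nat := pvOddPartF n n

-- the dragon turn at segment n: `1 if m % 4 == 1 else -1`
def pvTurn (n : Nat) : Int := if pvOddPart n % 4 = 1 then 1 else -1

-- B's loop body: turn, then move-and-mark; n.toNat is exact (n ranges over positive ints)
def pvBStep (st : Int × (Int × Int × List (List Bool))) (n : Int) :
    Int × (Int × Int × List (List Bool)) :=
  let cur := PySem.Int.mod (st.1 + pvTurn n.toNat) 4
  (cur, pvStep st.2 cur)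

def draw_dragon_alt (graph : List (List Bool)) (drag : Int × Int × Int × Int) : List (List Bool) :=
  let sx := drag.1; let sy := drag.2.1; let di := drag.2.2.1; let g := drag.2.2.2
  let graph1 := pvMark graph sx sy
  -- segment 0: the plain initial direction, no turn
  let st1 := pvStep (sx, sy, graph1) di
  -- 2 ** max(g, 0) ported as (2 : Int) ^ g.toNat (exact: toNat clamps at 0 like max)
  ((PySem.List.pyRange 1 ((2 : Int) ^ g.toNat) 1).foldl pvBStep (di, st1)).2.2.2

-- ===== PRECONDITION & SPEC =====
-- absolute direction of segment n (raw di at 0, then folded turns, Python-mod 4);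
-- defined by direct recursion on the segment index, used only to state which cells
-- the curve visits
def pvDirAt (di : Int) : Nat → Int
  | 0 => di
  | n + 1 => PySem.Int.mod (pvDirAt di n + pvTurn (n + 1)) 4

-- the positions the curve visits (after each of the 2^G segments)
def pvTrail (sx sy di : Int) (G : Nat) : List (Int × Int) :=
  (((List.range (2 ^ G)).map (pvDirAt di)).foldl
    (fun (acc : (Int × Int) × List (Int × Int)) d =>
      let p := (acc.1.1 + PySem.List.pyGetD pvDx d 0, acc.1.2 + PySem.List.pyGetD pvDy d 0)
      (p, p :: acc.2)) ((sx, sy), [])).2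

-- Pre_ excludes exactly the inputs on which A raises IndexError: di outside [-4,4)
-- (dx[di] fails), a start cell outside the grid, or the curve visiting an on-board
-- (0..100) cell that the grid does not contain; a grid covering the whole 0..100
-- board (first disjunct) can never fail an in-board write.
def Pre_draw_dragon (graph : List (List Bool)) (drag : Int × Int × Int × Int) : Prop :=
  -4 ≤ drag.2.2.1 ∧ drag.2.2.1 < 4 ∧
  PySem.Raise.InRange graph.length drag.1 ∧
  PySem.Raise.InRange (PySem.List.pyGetD graph drag.1 []).length drag.2.1 ∧
  ((101 ≤ graph.length ∧ ∀ row ∈ graph.take 101, 101 ≤ row.length) ∨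
   (∀ p ∈ pvTrail drag.1 drag.2.1 drag.2.2.1 drag.2.2.2.toNat,
      (0 ≤ p.1 ∧ p.1 ≤ 100 ∧ 0 ≤ p.2 ∧ p.2 ≤ 100) →
      (p.1 < (graph.length : Int) ∧ p.2 < ((PySem.List.pyGetD graph p.1 []).length : Int))))
instance (graph : List (List Bool)) (drag : Int × Int × Int × Int) : Decidable (Pre_draw_dragon graph drag) := by
  unfold Pre_draw_dragon; infer_instance

def pvWitness_draw_dragon : List (List Bool) × (Int × Int × Int × Int) :=
  (List.replicate 101 (List.replicate 101 false), (0, 0, 0, 1))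

def Spec_draw_dragon (graph : List (List Bool)) (drag : Int × Int × Int × Int) (out : List (List Bool)) : Prop := out = draw_dragon_alt graph drag
instance (graph : List (List Bool)) (drag : Int × Int × Int × Int) (out : List (List Bool)) : Decidable (Spec_draw_dragon graph drag out) := by unfold Spec_draw_dragon; infer_instance

-- ===== CLAIM (what is proved, stated in full; the proofs are below) =====
def Claim_equal_draw_dragon : Prop := ∀ (graph : List (List Bool)) (drag : Int × Int × Int × Int), Dom_draw_dragon graph drag → Pre_draw_dragon graph drag → Spec_draw_dragon graph drag (draw_dragon graph drag)

-- ===== LEMMAS AND PROOFS =====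

-- pvOddPartF ignores the exact fuel as long as it is ≥ m
lemma pvOddPartF_stable : ∀ (m f f' : Nat), m ≤ f → m ≤ f' → pvOddPartF f m = pvOddPartF f' m := by
  intro m
  induction m using Nat.strong_induction_on with
  | _ m ih =>
    intro f f' hf hf'
    match f, f' with
    | 0, 0 => rfl
    | 0, b + 1 => interval_cases m; simp [pvOddPartF]
    | a + 1, 0 => interval_cases m; simp [pvOddPartF]
    | a + 1, b + 1 =>
      simp only [pvOddPartF]
      split
      · next h => exact ih (m / 2) (by omega) a b (by omega) (by omega)
      · rfl

lemma pvOddPart_odd {n : Nat} (h : n % 2 = 1) : pvOddPart n = n := by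
  unfold pvOddPart
  match n with
  | m + 1 => simp [pvOddPartF, h]

lemma pvOddPart_two_mul {n : Nat} (h : n ≠ 0) : pvOddPart (2 * n) = pvOddPart n := by
  unfold pvOddPart
  have h2 : 2 * n = (2 * n - 1) + 1 := by omega
  rw [h2, pvOddPartF]
  have : ((2 * n - 1) + 1) % 2 = 0 ∧ (2 * n - 1) + 1 ≠ 0 := by omega
  rw [if_pos this]
  have : ((2 * n - 1) + 1) / 2 = n := by omega
  rw [this]
  exact pvOddPartF_stable n (2 * n - 1) n (by omega) le_rfl

lemma pvTurn_two_mul {n : Nat} (h : n ≠ 0) : pvTurn (2 * n) = pvTurn n := by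
  unfold pvTurn; rw [pvOddPart_two_mul h]

lemma pvOddPart_two_pow (g : Nat) : pvOddPart (2 ^ g) = 1 := by
  induction g with
  | zero => rfl
  | succ k ih => rw [pow_succ, mul_comm, pvOddPart_two_mul (by positivity)]; exact ih

lemma pvTurn_two_pow (g : Nat) : pvTurn (2 ^ g) = 1 := by
  unfold pvTurn; rw [pvOddPart_two_pow]; decide

-- reflection of the turn sequence inside a block [2^g, 2^(g+1))
lemma pvTurn_refl : ∀ (g i : Nat), 1 ≤ i → i < 2 ^ g →
    pvTurn (2 ^ g + i) = -pvTurn (2 ^ g - i) := by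
  intro g
  induction g with
  | zero => intro i h1 h2; omega
  | succ k ih =>
    intro i h1 h2
    have hp : 0 < 2 ^ k := Nat.two_pow_pos k
    rcases Nat.even_or_odd i with he | ho
    · obtain ⟨j, rfl⟩ := he
      have e1 : 2 ^ (k + 1) + (j + j) = 2 * (2 ^ k + j) := by rw [pow_succ]; ring
      have e2 : 2 ^ (k + 1) - (j + j) = 2 * (2 ^ k - j) := by rw [pow_succ] at *; omega
      rw [e1, e2, pvTurn_two_mul (by omega), pvTurn_two_mul (by rw [pow_succ] at h2; omega)]
      exact ih j (by omega) (by rw [pow_succ] at h2; omega)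
    · have hoi : i % 2 = 1 := Nat.odd_iff.mp ho
      match k, h2 with
      | 0, h2 =>
        have hi : i = 1 := by omega
        subst hi; decide
      | k + 1, h2 =>
        obtain ⟨m, hm⟩ : ∃ m, 2 ^ (k + 2) = 4 * m := ⟨2 ^ k, by ring⟩
        rw [hm] at h2
        unfold pvTurn
        rw [hm]
        rw [pvOddPart_odd (by omega), pvOddPart_odd (by omega)]
        have e1 : (4 * m + i) % 4 = i % 4 := by omega
        have e2 : (4 * m - i) % 4 = (4 - i % 4) % 4 := by omega
        have h13 : i % 4 = 1 ∨ i % 4 = 3 := by omega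
        rcases h13 with h | h <;> simp [e1, e2, h]

lemma pvModE (a : Int) : PySem.Int.mod a 4 = a % 4 :=
  PySem.Int.mod_eq_emod_of_pos (by norm_num)

-- reflection of the direction sequence
lemma pvDirAt_refl (di : Int) : ∀ (g j : Nat), j < 2 ^ g →
    pvDirAt di (2 ^ g + j) = PySem.Int.mod (pvDirAt di (2 ^ g - 1 - j) + 1) 4 := by
  intro g j
  induction j with
  | zero =>
    intro _
    have hp : 0 < 2 ^ g := Nat.two_pow_pos g
    have h1 : 2 ^ g + 0 = (2 ^ g - 1) + 1 := by omega
    rw [h1, pvDirAt, show (2 ^ g - 1) + 1 = 2 ^ g from by omega, pvTurn_two_pow,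
        Nat.sub_zero]
  | succ j ihj =>
    intro h
    have hp : 0 < 2 ^ g := Nat.two_pow_pos g
    have hj : j < 2 ^ g := by omega
    have e0 : 2 ^ g + (j + 1) = (2 ^ g + j) + 1 := by omega
    rw [e0, pvDirAt, ihj hj, show (2 ^ g + j) + 1 = 2 ^ g + (j + 1) from by omega,
        pvTurn_refl g (j + 1) (by omega) h,
        show 2 ^ g - (j + 1) = 2 ^ g - 1 - j from by omega]
    have he : 2 ^ g - 1 - j = (2 ^ g - 2 - j) + 1 := by omega
    rw [show 2 ^ g - 1 - (j + 1) = 2 ^ g - 2 - j from by omega]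
    conv_lhs => rw [he, pvDirAt, show (2 ^ g - 2 - j) + 1 = 2 ^ g - 1 - j from by omega]
    generalize pvTurn (2 ^ g - 1 - j) = t
    generalize pvDirAt di (2 ^ g - 2 - j) = X
    simp only [pvModE]
    omega

-- A's inner loop builds the reversed, rotated copy of dirs
lemma pvInner (dirs : List Int) :
    (PySem.List.pyRange 0 (dirs.length : Int) 1).foldl
      (fun temp i => temp ++ [PySem.Int.mod (PySem.List.pyGetD dirs (-i - 1) 0 + 1) 4]) []
    = dirs.reverse.map (fun d => PySem.Int.mod (d + 1) 4) := by
  rw [PySem.List.foldl_append_singleton_eq_map, PySem.List.pyRange_one]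
  simp only [List.map_map, List.nil_append]
  apply List.ext_getElem
  · simp
  · intro k h1 h2
    simp only [List.getElem_map, List.getElem_range, List.getElem_reverse, Function.comp_apply]
    rw [show -((0:Int) + (k:Int)) - 1 = -(((k+1 : Nat) : Int)) from by push_cast; ring]
    rw [PySem.List.pyGetD_neg_natCast dirs (k+1) 0 (by omega) (by simp at h1; omega)]
    have hk : dirs.length - (k + 1) = dirs.length - 1 - k := by omega
    simp only [hk]

-- A's doubling step, as a function to iterate
def pvDouble (dirs : List Int) : List Int :=
  dirs ++ dirs.reverse.map (fun d => PySem.Int.mod (d + 1) 4)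

lemma pvFoldConst {α β : Type} (F : α → α) : ∀ (l : List β) (init : α),
    l.foldl (fun a _ => F a) init = F^[l.length] init := by
  intro l
  induction l with
  | nil => simp
  | cons x xs ih => intro init; simp [List.foldl_cons, ih, Function.iterate_succ_apply]

-- A's direction list after k generations, segment by segment
lemma pvDirs (di : Int) : ∀ (k : Nat),
    pvDouble^[k] [di] = (List.range (2 ^ k)).map (pvDirAt di) := by
  intro k
  induction k with
  | zero => simp [List.range_one]; rfl
  | succ k ih =>
    rw [Function.iterate_succ_apply', ih]
    unfold pvDouble
    rw [show 2 ^ (k + 1) = 2 ^ k + 2 ^ k from by ring, List.range_add, List.map_append,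
        List.map_map]
    congr 1
    apply List.ext_getElem
    · simp
    · intro j h1 h2
      simp only [List.getElem_map, List.getElem_reverse, List.getElem_range, List.length_map,
        List.length_range, Function.comp_apply] at *
      rw [pvDirAt_refl di k j (by simpa using h2)]

-- B's loop walks the same direction sequence
lemma pvBLoop (di : Int) : ∀ (N k : Nat) (st : Int × Int × List (List Bool)),
    (PySem.List.pyRange ((k : Int) + 1) ((k : Int) + 1 + (N : Int)) 1).foldl
      pvBStep (pvDirAt di k, st)
    = (pvDirAt di (k + N), ((List.range' (k + 1) N).map (pvDirAt di)).foldl pvStep st) := by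
  intro N
  induction N with
  | zero =>
    intro k st
    rw [PySem.List.pyRange_one_eq_nil (by omega)]
    simp
  | succ N ih =>
    intro k st
    rw [PySem.List.pyRange_one_cons (by omega)]
    simp only [List.foldl_cons, pvBStep]
    have e2 : PySem.Int.mod (pvDirAt di k + pvTurn (((k : Int) + 1).toNat)) 4 = pvDirAt di (k + 1) := by
      rw [show ((k : Int) + 1).toNat = k + 1 from by omega]
      rfl
    rw [e2]
    rw [show (k : Int) + 1 + ((N + 1 : Nat) : Int) = ((k + 1 : Nat) : Int) + 1 + (N : Int) from by push_cast; ring]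
    rw [show (k : Int) + 1 + 1 = ((k + 1 : Nat) : Int) + 1 from by push_cast; ring]
    rw [ih (k + 1) (pvStep st (pvDirAt di (k + 1)))]
    rw [List.range'_succ, List.map_cons, List.foldl_cons,
        show k + (N + 1) = k + 1 + N from by omega]

-- ===== VERDICT (by name: the statement is the Claim_ definition above) =====
theorem draw_dragon_spec : Claim_equal_draw_dragon := by
  intro graph drag _ _
  unfold Spec_draw_dragon
  obtain ⟨sx, sy, di, g⟩ := drag
  simp only [draw_dragon, draw_dragon_alt, pvInner]
  rw [show (List.foldl (fun (dirs : List Int) (_ : Int) =>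
        dirs ++ dirs.reverse.map (fun d => PySem.Int.mod (d + 1) 4)) [di]
        (PySem.List.pyRange 0 g 1))
      = pvDouble^[(PySem.List.pyRange 0 g 1).length] [di] from pvFoldConst pvDouble _ _]
  rw [PySem.List.length_pyRange_one]
  rw [show (g - 0).toNat = g.toNat from by omega]
  rw [pvDirs di g.toNat]
  have hp : 0 < 2 ^ g.toNat := Nat.two_pow_pos g.toNat
  -- B's loop via pvBLoop at k = 0, N = 2^g.toNat - 1
  have hb := pvBLoop di (2 ^ g.toNat - 1) 0 (pvStep (sx, sy, pvMark graph sx sy) di)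
  rw [show pvDirAt di 0 = di from rfl] at hb
  rw [show ((0 : Nat) : Int) + 1 + ((2 ^ g.toNat - 1 : Nat) : Int) = (2 : Int) ^ g.toNat from by
        push_cast [Nat.cast_sub hp]; ring,
      show ((0 : Nat) : Int) + 1 = (1 : Int) from by norm_num] at hb
  rw [hb]
  -- A's fold: split off segment 0
  rw [List.range_eq_range', show 2 ^ g.toNat = (2 ^ g.toNat - 1) + 1 from by omega,
      List.range'_succ, List.map_cons, List.foldl_cons,
      show pvDirAt di 0 = di from rfl]
  simp [show 2 ^ g.toNat - 1 + 1 - 1 = 2 ^ g.toNat - 1 from by omega]
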